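-- pv_equiv track=rewrite | github.com/TikSL/Advent-of-Code | 2024/07.py | possible_1
-- ===== SOURCE A (Python) =====
-- def possible_1(target_number, number_list):
--     if len(number_list) == 1:
--         return number_list[0] == target_number
--     else:
--         if possible_1(target_number, [number_list[0] + number_list[1]] + number_list[2:]):
--             return True
--         if possible_1(target_number, [number_list[0] * number_list[1]] + number_list[2:]):
--             return True
--         return False
-- ===== SOURCE B (Python) =====
-- def possible_1(target_number, number_list):
--     # forward set DP: one pass maintaining the set of reachable values
--     vals = {number_list[0]}
--     for x in number_list[1:]:
--         vals = {v + x for v in vals} | {v * x for v in vals}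
--     return target_number in vals
-- ===== Notes on version B (the rewrite author's own statement) =====
-- stated objective: alternative
-- what changed: Replaces A's branching recursion over list prefixes with a single forward loop maintaining the deduplicated set of values reachable so far.
import Mathlib
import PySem

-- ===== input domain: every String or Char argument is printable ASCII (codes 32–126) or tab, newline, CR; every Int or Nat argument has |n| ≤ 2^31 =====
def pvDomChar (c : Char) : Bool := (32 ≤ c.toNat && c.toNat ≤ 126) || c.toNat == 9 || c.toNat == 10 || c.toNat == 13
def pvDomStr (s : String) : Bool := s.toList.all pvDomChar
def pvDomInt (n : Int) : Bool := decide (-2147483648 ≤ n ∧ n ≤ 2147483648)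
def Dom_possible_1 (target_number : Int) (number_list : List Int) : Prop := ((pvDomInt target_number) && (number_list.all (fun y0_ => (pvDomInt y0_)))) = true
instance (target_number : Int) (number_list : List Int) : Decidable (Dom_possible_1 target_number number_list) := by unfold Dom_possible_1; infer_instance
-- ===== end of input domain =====

-- B replaces A's branching recursion by one forward pass maintaining the deduplicated set
-- of reachable values (objective: alternative).

-- ===== PORT A =====
-- A recurses, merging the first two elements with + and with *; on [] Python raises
-- IndexError (excluded by Pre_), the port returns false there.
def possible_1 (target_number : Int) (number_list : List Int) : Bool :=
  match number_list with
  | [] => false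
  | [a] => a == target_number
  | a :: b :: rest =>
      possible_1 target_number ((a + b) :: rest) ||
      possible_1 target_number ((a * b) :: rest)
termination_by number_list.length

-- ===== PORT B =====
-- the loop body: vals = {v + x for v in vals} | {v * x for v in vals}
def pvStep (vals : PySem.Set Int) (x : Int) : PySem.Set Int :=
  PySem.Set.union (PySem.Set.ofList (vals.map (· + x))) (vals.map (· * x))

def possible_1_alt (target_number : Int) (number_list : List Int) : Bool :=
  match number_list with
  | [] => false   -- Source B raises IndexError here (excluded by Pre_)
  | a :: rest =>
      let vals := rest.foldl pvStep (PySem.Set.ofList [a])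
      PySem.Set.contains vals target_number

-- ===== PRECONDITION & SPEC =====
-- Both Pythons raise IndexError on the empty list; Pre_ excludes exactly that.
def Pre_possible_1 (target_number : Int) (number_list : List Int) : Prop := number_list ≠ []
instance (target_number : Int) (number_list : List Int) : Decidable (Pre_possible_1 target_number number_list) := by unfold Pre_possible_1; infer_instance
def pvWitness_possible_1 : Int × List Int := (6, [2, 3])

def Spec_possible_1 (target_number : Int) (number_list : List Int) (out : Bool) : Prop := out = possible_1_alt target_number number_list
instance (target_number : Int) (number_list : List Int) (out : Bool) : Decidable (Spec_possible_1 target_number number_list out) := by unfold Spec_possible_1; infer_instance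

-- ===== CLAIM (what is proved, stated in full; the proofs are below) =====
def Claim_equal_possible_1 : Prop := ∀ (target_number : Int) (number_list : List Int), Dom_possible_1 target_number number_list → Pre_possible_1 target_number number_list → Spec_possible_1 target_number number_list (possible_1 target_number number_list)

-- ===== LEMMAS AND PROOFS =====

theorem possible_1_singleton (t a : Int) : possible_1 t [a] = (a == t) := by
  simp [possible_1]

theorem possible_1_cons_cons (t a b : Int) (rest : List Int) :
    possible_1 t (a :: b :: rest) =
      (possible_1 t ((a + b) :: rest) || possible_1 t ((a * b) :: rest)) := by
  simp [possible_1]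

theorem mem_pvStep (s : PySem.Set Int) (x w : Int) :
    w ∈ pvStep s x ↔ (∃ v ∈ s, w = v + x) ∨ (∃ v ∈ s, w = v * x) := by
  simp [pvStep, PySem.Set.mem_union, PySem.Set.mem_ofList, List.mem_map, eq_comm]

theorem loop_mem (t : Int) : ∀ (rest : List Int) (s : PySem.Set Int),
    (t ∈ rest.foldl pvStep s) ↔ ∃ v ∈ s, possible_1 t (v :: rest) = true := by
  intro rest
  induction rest with
  | nil =>
      intro s
      simp [possible_1_singleton, List.foldl]
  | cons x rest ih =>
      intro s
      rw [List.foldl_cons, ih (pvStep s x)]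
      constructor
      · rintro ⟨w, hw, hrec⟩
        rw [mem_pvStep] at hw
        rcases hw with ⟨v, hv, rfl⟩ | ⟨v, hv, rfl⟩
        · exact ⟨v, hv, by rw [possible_1_cons_cons]; simp [hrec]⟩
        · exact ⟨v, hv, by rw [possible_1_cons_cons]; simp [hrec]⟩
      · rintro ⟨v, hv, hrec⟩
        rw [possible_1_cons_cons, Bool.or_eq_true] at hrec
        rcases hrec with h | h
        · exact ⟨v + x, (mem_pvStep s x _).2 (Or.inl ⟨v, hv, rfl⟩), h⟩
        · exact ⟨v * x, (mem_pvStep s x _).2 (Or.inr ⟨v, hv, rfl⟩), h⟩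

-- ===== VERDICT (by name: the statement is the Claim_ definition above) =====
theorem possible_1_spec : Claim_equal_possible_1 := by
  intro t l _ hpre
  unfold Spec_possible_1
  match l with
  | [] => exact absurd rfl hpre
  | a :: rest =>
      show possible_1 t (a :: rest) = possible_1_alt t (a :: rest)
      rw [Bool.eq_iff_iff]
      simp only [possible_1_alt, PySem.Set.contains_iff]
      rw [loop_mem t rest (PySem.Set.ofList [a])]
      constructor
      · intro h; exact ⟨a, by simp [PySem.Set.mem_ofList], h⟩
      · rintro ⟨v, hv, h⟩
        simp [PySem.Set.mem_ofList] at hv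
        subst hv; exact h
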